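-- pv_equiv track=rewrite | github.com/e-landeros/ad_video_analyzer | tests/analyzers/test_visual_elements_analyzer.py | _determine_color_mood
-- ===== SOURCE A (Python) =====
-- def _determine_color_mood(saturation, value, colors):
--     # Mock implementation with monochromatic detection
--     if saturation < 50:
--         if value < 80:
--             return "dark"
--         elif value > 180:
--             return "bright"
--         else:
--             return "muted"
--     elif saturation > 150:
--         # Check if colors are very similar (monochromatic)
--         if len(colors) > 1:
--             color_diversity = 0
--             for i in range(len(colors)):
--                 for j in range(i + 1, len(colors)):
--                     color_diversity += sum(
--                         abs(c1 - c2) for c1, c2 in zip(colors[i], colors[j])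
--                     )
--
--             # If colors are very similar, it's monochromatic
--             if color_diversity < 100:  # Low diversity threshold
--                 return "monochromatic"
--
--         return "vibrant"
--     else:
--         if value > 180:
--             return "bright"
--         elif value < 80:
--             return "dark"
--         else:
--             return "neutral"
-- ===== SOURCE B (Python) =====
-- def _determine_color_mood(saturation, value, colors):
--     if saturation < 50:
--         if value < 80:
--             return "dark"
--         if value > 180:
--             return "bright"
--         return "muted"
--     if saturation > 150:
--         if len(colors) > 1 and _color_diversity(colors) < 100:
--             return "monochromatic"
--         return "vibrant"
--     if value > 180:
--         return "bright"
--     if value < 80: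
--         return "dark"
--     return "neutral"
--
--
-- def _color_diversity(colors):
--     # Sum over all pairs i<j of sum_k |colors[i][k]-colors[j][k]| (zip-truncated),
--     # computed channel by channel via sorting + a running prefix sum: O(n log n)
--     # per channel instead of the quadratic pair loop.
--     total = 0
--     width = max(map(len, colors), default=0)
--     for k in range(width):
--         vals = sorted(c[k] for c in colors if len(c) > k)
--         prefix = 0
--         for idx, v in enumerate(vals):
--             total += v * idx - prefix
--             prefix += v
--     return total
-- ===== Notes on version B (the rewrite author's own statement) =====
-- stated objective: faster
-- what changed: The quadratic all-pairs color-diversity loop is replaced by a per-channel computation: for each channel, collect the entries of rows long enough to have one, sort them, and accumulate the sum of pairwise absolute differences with a running prefix sum.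
import Mathlib
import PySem

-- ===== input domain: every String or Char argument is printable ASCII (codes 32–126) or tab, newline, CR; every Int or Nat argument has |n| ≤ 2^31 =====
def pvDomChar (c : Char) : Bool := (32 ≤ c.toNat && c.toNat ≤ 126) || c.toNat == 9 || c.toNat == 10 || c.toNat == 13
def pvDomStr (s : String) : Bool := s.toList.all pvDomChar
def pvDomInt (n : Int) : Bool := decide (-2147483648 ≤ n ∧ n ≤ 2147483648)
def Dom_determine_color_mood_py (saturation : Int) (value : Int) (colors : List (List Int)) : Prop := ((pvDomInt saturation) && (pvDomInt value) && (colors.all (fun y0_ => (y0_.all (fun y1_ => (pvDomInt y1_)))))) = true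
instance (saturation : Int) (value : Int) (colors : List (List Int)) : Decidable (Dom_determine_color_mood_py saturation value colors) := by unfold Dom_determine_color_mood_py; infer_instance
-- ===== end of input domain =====

-- B replaces A's quadratic pair-by-pair diversity loop by a per-channel sort + running
-- prefix-sum computation of the same sum of pairwise absolute differences.

-- ===== PORT A =====

-- sum(abs(c1 - c2) for c1, c2 in zip(colors[i], colors[j]))
def zipAbsSum (a b : List Int) : Int :=
  (List.map (fun p => |p.1 - p.2|) (a.zip b)).sum

-- the nested 'for i in range(len(colors)): for j in range(i+1, len(colors)): …' loop
def diversityA (colors : List (List Int)) : Int :=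
  List.foldl
    (fun acc i =>
      List.foldl
        (fun acc2 j =>
          acc2 + zipAbsSum (PySem.List.pyGetD colors i []) (PySem.List.pyGetD colors j []))
        acc (PySem.List.pyRange (i + 1) (colors.length : Int)))
    0 (PySem.List.pyRange 0 (colors.length : Int))

def determine_color_mood_py (saturation : Int) (value : Int) (colors : List (List Int)) : String :=
  if saturation < 50 then
    if value < 80 then "dark"
    else if value > 180 then "bright"
    else "muted"
  else if saturation > 150 then
    if colors.length > 1 then
      if diversityA colors < 100 then "monochromatic" else "vibrant"
    else "vibrant"
  else
    if value > 180 then "bright"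
    else if value < 80 then "dark"
    else "neutral"

-- ===== PORT B =====

-- 'sorted(c[k] for c in colors if len(c) > k)'; c[k] is in range under the guard, so
-- pyGetD (with an unused default) is exact here
def chanVals (colors : List (List Int)) (k : Int) : List Int :=
  PySem.List.sorted
    ((colors.filter (fun c => decide (k < (c.length : Int)))).map
      (fun c => PySem.List.pyGetD c k 0))
    (fun x => x)

-- the per-channel prefix-sum loop of Source B's _color_diversity
def diversityB (colors : List (List Int)) : Int :=
  let width := PySem.List.maxD (colors.map (fun c => (c.length : Int))) (fun x => x) 0
  List.foldl
    (fun total k =>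
      (List.foldl (fun st q => (st.1 + q.2 * q.1 - st.2, st.2 + q.2)) (total, 0)
        (PySem.List.enumerate (chanVals colors k))).1)
    0 (PySem.List.pyRange 0 width)

def determine_color_mood_py_alt (saturation : Int) (value : Int) (colors : List (List Int)) : String :=
  if saturation < 50 then
    if value < 80 then "dark"
    else if value > 180 then "bright"
    else "muted"
  else if saturation > 150 then
    if colors.length > 1 ∧ diversityB colors < 100 then "monochromatic"
    else "vibrant"
  else
    if value > 180 then "bright"
    else if value < 80 then "dark"
    else "neutral"

-- ===== PRECONDITION & SPEC =====
def Spec_determine_color_mood_py (saturation : Int) (value : Int) (colors : List (List Int)) (out : String) : Prop := out = determine_color_mood_py_alt saturation value colors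
instance (saturation : Int) (value : Int) (colors : List (List Int)) (out : String) : Decidable (Spec_determine_color_mood_py saturation value colors out) := by unfold Spec_determine_color_mood_py; infer_instance

-- ===== CLAIM (what is proved, stated in full; the proofs are below) =====
def Claim_equal_determine_color_mood_py : Prop := ∀ (saturation : Int) (value : Int) (colors : List (List Int)), Dom_determine_color_mood_py saturation value colors → Spec_determine_color_mood_py saturation value colors (determine_color_mood_py saturation value colors)

-- ===== LEMMAS AND PROOFS =====

-- sum of f over all unordered pairs, in list order
def pairsum {α : Type} (f : α → α → Int) : List α → Int
  | [] => 0
  | x :: xs => (xs.map (f x)).sum + pairsum f xs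

-- channel k of colors: the k-th entries of all rows long enough to have one
def chanN (k : Nat) (colors : List (List Int)) : List Int :=
  (colors.filter (fun c => decide (k < c.length))).map (fun c => c.getD k 0)

-- ---- A side: diversityA = pairsum zipAbsSum ----

lemma sum_range_pairs (colors : List (List Int)) :
    ((List.range colors.length).map
      (fun i => ((colors.drop (i + 1)).map (zipAbsSum (colors.getD i []))).sum)).sum
    = pairsum zipAbsSum colors := by
  induction colors with
  | nil => simp [pairsum]
  | cons c cs ih =>
    rw [show (c :: cs).length = cs.length + 1 from rfl, List.range_succ_eq_map]
    simp only [List.map_cons, List.sum_cons, List.map_map, Function.comp_def, Nat.succ_eq_add_one,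
      List.getD_cons_succ, List.drop_succ_cons, List.getD_cons_zero, List.drop_zero]
    rw [ih]
    rfl

lemma diversityA_eq (colors : List (List Int)) :
    diversityA colors = pairsum zipAbsSum colors := by
  unfold diversityA
  rw [PySem.List.foldl_congr_mem _ _
      (fun acc i => acc + ((colors.drop (i.toNat + 1)).map (zipAbsSum (colors.getD i.toNat []))).sum) 0 ?_]
  · rw [PySem.List.foldl_add]
    rw [show ((colors.length : Int)) = ((colors.length : Nat) : Int) from rfl,
      PySem.List.pyRange_zero_natCast, List.map_map]
    simp only [Function.comp_def, Int.toNat_natCast, zero_add]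
    exact sum_range_pairs colors
  · intro acc i hi
    have h0 : 0 ≤ i := (PySem.List.mem_pyRange_one.mp hi).1
    rw [PySem.List.pyGetD_of_nonneg _ _ h0]
    rw [PySem.List.foldl_pyRange_pyGetD' colors []
      (fun acc2 cj => acc2 + zipAbsSum (colors.getD i.toNat []) cj) acc (by omega)]
    rw [PySem.List.foldl_add]
    have : (i + 1).toNat = i.toNat + 1 := by omega
    rw [this]

-- ---- channel decomposition ----

lemma zipAbs_expand (x : List Int) :
    ∀ (y : List Int) (w : Nat), min x.length y.length ≤ w →
    zipAbsSum x y
      = ((List.range w).map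
          (fun k => if k < x.length ∧ k < y.length then |x.getD k 0 - y.getD k 0| else 0)).sum := by
  induction x with
  | nil => intro y w _; simp [zipAbsSum]
  | cons a x ih =>
    intro y w hw
    cases y with
    | nil => simp [zipAbsSum]
    | cons b y =>
      have hw' : min x.length y.length + 1 ≤ w := by
        simp only [List.length_cons] at hw; omega
      cases w with
      | zero => exact absurd hw' (by omega)
      | succ w' =>
        rw [List.range_succ_eq_map]
        simp only [List.map_cons, List.sum_cons, List.map_map, Function.comp_def,
          List.getD_cons_succ, List.length_cons, List.getD_cons_zero, Nat.succ_eq_add_one]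
        have hmap : List.map (fun k => if k + 1 < x.length + 1 ∧ k + 1 < y.length + 1
              then |x.getD k 0 - y.getD k 0| else 0) (List.range w')
            = List.map (fun k => if k < x.length ∧ k < y.length
              then |x.getD k 0 - y.getD k 0| else 0) (List.range w') := by
          refine List.map_congr_left ?_
          intro k _
          have h : (k + 1 < x.length + 1 ∧ k + 1 < y.length + 1)
              ↔ (k < x.length ∧ k < y.length) := by omega
          rw [if_congr h rfl rfl]
        rw [hmap, ← ih y w' (by omega)]
        have h0 : (0 < x.length + 1 ∧ 0 < y.length + 1) := by omega
        rw [if_pos h0]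
        simp [zipAbsSum]

lemma sum_sum_comm {α β : Type} (xs : List α) (K : List β) (g : α → β → Int) :
    (xs.map (fun y => (K.map (g y)).sum)).sum
      = (K.map (fun k => (xs.map (fun y => g y k)).sum)).sum := by
  induction xs with
  | nil => simp
  | cons x xs ih =>
    simp only [List.map_cons, List.sum_cons, ih,
      PySem.List.sum_map_add_int K (fun k => g x k) (fun k => (xs.map (fun y => g y k)).sum)]

lemma sum_map_ite_filter {α : Type} (l : List α) (p : α → Bool) (f : α → Int) :
    (l.map (fun y => if p y then f y else 0)).sum = ((l.filter p).map f).sum := by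
  induction l with
  | nil => simp
  | cons x xs ih =>
    by_cases hx : p x = true <;> simp [hx, ih]

lemma pairsum_chan (colors : List (List Int)) (w : Nat)
    (hw : ∀ c ∈ colors, c.length ≤ w) :
    pairsum zipAbsSum colors
      = ((List.range w).map (fun k => pairsum (fun a b => |a - b|) (chanN k colors))).sum := by
  induction colors with
  | nil =>
    simp [pairsum, chanN]
  | cons x xs ih =>
    have hx : x.length ≤ w := hw x (List.mem_cons_self ..)
    have hxs : ∀ c ∈ xs, c.length ≤ w := fun c hc => hw c (List.mem_cons_of_mem _ hc)
    have hstep : pairsum zipAbsSum (x :: xs)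
        = (xs.map (zipAbsSum x)).sum + pairsum zipAbsSum xs := rfl
    rw [hstep, ih hxs]
    have hexp : (xs.map (zipAbsSum x)).sum
        = (xs.map (fun y => ((List.range w).map
            (fun k => if k < x.length ∧ k < y.length then |x.getD k 0 - y.getD k 0| else 0)).sum)).sum := by
      refine congrArg _ (List.map_congr_left ?_)
      intro y _
      exact zipAbs_expand x y w (by omega)
    rw [hexp, sum_sum_comm]
    have hinner : ∀ k ∈ List.range w,
        (xs.map (fun y => if k < x.length ∧ k < y.length then |x.getD k 0 - y.getD k 0| else 0)).sum
          + pairsum (fun a b => |a - b|) (chanN k xs)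
        = pairsum (fun a b => |a - b|) (chanN k (x :: xs)) := by
      intro k _
      by_cases hk : k < x.length
      · have hcons : chanN k (x :: xs) = x.getD k 0 :: chanN k xs := by
          simp [chanN, hk]
        rw [hcons]
        have : pairsum (fun a b => |a - b|) (x.getD k 0 :: chanN k xs)
            = ((chanN k xs).map (fun u => |x.getD k 0 - u|)).sum
              + pairsum (fun a b => |a - b|) (chanN k xs) := rfl
        rw [this]
        congr 1
        rw [show chanN k xs = (xs.filter (fun c => decide (k < c.length))).map (fun c => c.getD k 0) from rfl,
          List.map_map]
        rw [← sum_map_ite_filter xs (fun c => decide (k < c.length))]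
        refine congrArg _ (List.map_congr_left ?_)
        intro y _
        by_cases hky : k < y.length <;> simp [hk, hky]
      · have hcons : chanN k (x :: xs) = chanN k xs := by
          simp [chanN, hk]
        rw [hcons]
        have : (xs.map (fun y => if k < x.length ∧ k < y.length then |x.getD k 0 - y.getD k 0| else 0)).sum
            = (xs.map (fun _ => (0 : Int))).sum := by
          refine congrArg _ (List.map_congr_left ?_)
          intro y _
          simp [hk]
        rw [this, PySem.List.sum_map_const_int]
        ring
    calc ((List.range w).map (fun k =>
            (xs.map (fun y => if k < x.length ∧ k < y.length then |x.getD k 0 - y.getD k 0| else 0)).sum)).sum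
          + ((List.range w).map (fun k => pairsum (fun a b => |a - b|) (chanN k xs))).sum
        = ((List.range w).map (fun k =>
            (xs.map (fun y => if k < x.length ∧ k < y.length then |x.getD k 0 - y.getD k 0| else 0)).sum
              + pairsum (fun a b => |a - b|) (chanN k xs))).sum := by
          rw [PySem.List.sum_map_add_int]
      _ = ((List.range w).map (fun k => pairsum (fun a b => |a - b|) (chanN k (x :: xs)))).sum := by
          exact congrArg _ (List.map_congr_left hinner)

-- ---- symmetry / order lemmas ----

lemma pairsum_perm {α : Type} (f : α → α → Int) (hsym : ∀ a b, f a b = f b a)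
    {l₁ l₂ : List α} (h : l₁.Perm l₂) : pairsum f l₁ = pairsum f l₂ := by
  induction h with
  | nil => rfl
  | cons z h ih =>
    simp only [pairsum, ih, (h.map _).sum_eq]
  | swap x y l =>
    simp only [pairsum, List.map_cons, List.sum_cons, hsym x y]
    ring
  | trans h₁ h₂ ih₁ ih₂ => exact ih₁.trans ih₂

lemma pairsum_abs_of_sorted (l : List Int) (h : l.Pairwise (· ≤ ·)) :
    pairsum (fun a b => |a - b|) l = pairsum (fun a b => b - a) l := by
  induction l with
  | nil => rfl
  | cons x xs ih =>
    rcases List.pairwise_cons.mp h with ⟨hx, hxs⟩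
    simp only [pairsum, ih hxs]
    congr 1
    refine congrArg _ (List.map_congr_left ?_)
    intro u hu
    have := hx u hu
    rw [abs_of_nonpos (by omega)]
    omega

-- ---- B side ----

lemma sum_map_sub_const (t : List Int) (v : Int) :
    (t.map (fun u => u - v)).sum = t.sum - t.length * v := by
  induction t with
  | nil => simp
  | cons r t iht =>
    simp only [List.map_cons, List.sum_cons, List.length_cons, iht]
    push_cast
    ring

lemma enumLoop (l : List Int) :
    ∀ (total p s : Int),
    (List.foldl (fun st q => (st.1 + q.2 * q.1 - st.2, st.2 + q.2)) (total, p)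
        (PySem.List.enumerate l s)).1
      = total + s * l.sum - p * l.length + pairsum (fun a b => b - a) l := by
  induction l with
  | nil => intro total p s; simp [PySem.List.enumerate_nil, pairsum]
  | cons v rest ih =>
    intro total p s
    rw [PySem.List.enumerate_cons, List.foldl_cons]
    have hstep : ((total, p).1 + (s, v).2 * (s, v).1 - (total, p).2, (total, p).2 + (s, v).2)
        = (total + v * s - p, p + v) := rfl
    rw [hstep, ih]
    have hsub := sum_map_sub_const rest v
    simp only [pairsum, List.length_cons, List.sum_cons, hsub]
    push_cast
    ring

lemma chanVals_eq (colors : List (List Int)) (k : Nat) :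
    chanVals colors (k : Int) = PySem.List.sorted (chanN k colors) (fun x => x) := by
  unfold chanVals chanN
  congr 1
  have hp : (fun c : List Int => decide ((k : Int) < (c.length : Int)))
      = fun c : List Int => decide (k < c.length) := by
    funext c; simp
  rw [hp]
  refine List.map_congr_left ?_
  intro c _
  rw [PySem.List.pyGetD_of_nonneg _ _ (Int.natCast_nonneg k)]
  simp

lemma diversityB_eq (colors : List (List Int)) :
    diversityB colors = diversityA colors := by
  have hB : diversityB colors
      = List.foldl
          (fun total k =>
            (List.foldl (fun st q => (st.1 + q.2 * q.1 - st.2, st.2 + q.2)) (total, 0)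
              (PySem.List.enumerate (chanVals colors k))).1)
          0 (PySem.List.pyRange 0
              (PySem.List.maxD (colors.map (fun c => (c.length : Int))) (fun x => x) 0)) := rfl
  rw [hB]
  set width := PySem.List.maxD (colors.map (fun c => (c.length : Int))) (fun x => x) 0 with hwdef
  have hw0 : 0 ≤ width := by
    rcases h : PySem.List.max? (colors.map (fun c => (c.length : Int))) (fun x => x) with _ | m
    · simp [hwdef, PySem.List.maxD, h]
    · have hm := PySem.List.max?_mem h
      rcases List.mem_map.mp hm with ⟨c, _, rfl⟩
      simp [hwdef, PySem.List.maxD, h]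
  have hwle : ∀ c ∈ colors, (c.length : Int) ≤ width := by
    intro c hc
    rcases h : PySem.List.max? (colors.map (fun c => (c.length : Int))) (fun x => x) with _ | m
    · rw [PySem.List.max?_eq_none_iff] at h
      rw [List.map_eq_nil_iff] at h
      subst h; simp at hc
    · have := PySem.List.max?_isMax h ((c.length : Int)) (List.mem_map_of_mem hc)
      simpa [hwdef, PySem.List.maxD, h] using this
  rw [show width = ((width.toNat : Nat) : Int) by omega, PySem.List.pyRange_zero_natCast]
  rw [List.foldl_map]
  rw [PySem.List.foldl_congr_mem _ _
      (fun total k => total + pairsum (fun a b => |a - b|) (chanN k colors)) 0 ?_]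
  · rw [PySem.List.foldl_add, zero_add, diversityA_eq]
    exact (pairsum_chan colors width.toNat (fun c hc => by have := hwle c hc; omega)).symm
  · intro total k _
    rw [enumLoop]
    simp only [zero_mul, sub_zero, add_zero]
    rw [chanVals_eq]
    have hpair : (PySem.List.sorted (chanN k colors) (fun x : Int => x)).Pairwise (· ≤ ·) := by
      simpa using PySem.List.sorted_pairwise (chanN k colors) (fun x : Int => x)
    rw [← pairsum_abs_of_sorted _ hpair]
    congr 1
    exact pairsum_perm _ (fun a b => abs_sub_comm a b)
      (PySem.List.sorted_perm (chanN k colors) (fun x : Int => x) false)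

-- ===== VERDICT (by name: the statement is the Claim_ definition above) =====
theorem determine_color_mood_py_spec : Claim_equal_determine_color_mood_py := by
  intro saturation value colors _
  unfold Spec_determine_color_mood_py determine_color_mood_py determine_color_mood_py_alt
  rw [← diversityB_eq colors]
  split_ifs <;> first | rfl | tauto
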